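-- pv_equiv track=rewrite | github.com/ScaleupCFO-AI/AI-CFO-Dashboard-backend | app/metrics/kpi_hierarchy.py | build_kpi_hierarchy
-- ===== SOURCE A (Python) =====
-- def build_kpi_hierarchy(root_kpis, dependency_graph, max_depth=2):
--     """
--     root_kpis: ["burn_rate", "runway_months"]
--
--     returns:
--     {
--       "main": [...],
--       "first_degree": [...],
--       "second_degree": [...]
--     }
--     """
--
--     hierarchy = {
--         "main": set(),
--         "first_degree": set(),
--         "second_degree": set(),
--     }
--
--     for root in root_kpis:
--         visited = {root}
--         current = [root]
--
--         hierarchy["main"].add(root)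
--
--         for depth in range(1, max_depth + 1):
--             next_level = []
--
--             for metric in current:
--                 for dep in dependency_graph.get(metric, []):
--                     if dep not in visited:
--                         visited.add(dep)
--                         next_level.append(dep)
--
--             if depth == 1:
--                 hierarchy["first_degree"].update(next_level)
--             elif depth == 2:
--                 hierarchy["second_degree"].update(next_level)
--
--             current = next_level
--
--     # ---- precedence cleanup
--     hierarchy["first_degree"] -= hierarchy["main"]
--     hierarchy["second_degree"] -= hierarchy["main"]
--     hierarchy["second_degree"] -= hierarchy["first_degree"]
--
--     return {
--         "main": sorted(hierarchy["main"]),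
--         "first_degree": sorted(hierarchy["first_degree"]),
--         "second_degree": sorted(hierarchy["second_degree"]),
--     }
-- ===== SOURCE B (Python) =====
-- def build_kpi_hierarchy(root_kpis, dependency_graph, max_depth=2):
--     main = set(root_kpis)
--
--     first_raw = set()
--     if max_depth >= 1:
--         for r in root_kpis:
--             first_raw.update(dependency_graph.get(r, []))
--
--     second_raw = set()
--     if max_depth >= 2:
--         for m in first_raw:
--             second_raw.update(dependency_graph.get(m, []))
--
--     first = first_raw - main
--     second = second_raw - main - first
--
--     return {
--         "main": sorted(main),
--         "first_degree": sorted(first),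
--         "second_degree": sorted(second),
--     }
-- ===== Notes on version B (the rewrite author's own statement) =====
-- stated objective: faster
-- what changed: Replaces the per-root BFS (visited set, frontier list, depth loop running all the way to max_depth even on empty frontiers) by two flat union passes -- union of deps over the roots, then union of deps over that raw first level -- followed by the same precedence subtractions.
import Mathlib
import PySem

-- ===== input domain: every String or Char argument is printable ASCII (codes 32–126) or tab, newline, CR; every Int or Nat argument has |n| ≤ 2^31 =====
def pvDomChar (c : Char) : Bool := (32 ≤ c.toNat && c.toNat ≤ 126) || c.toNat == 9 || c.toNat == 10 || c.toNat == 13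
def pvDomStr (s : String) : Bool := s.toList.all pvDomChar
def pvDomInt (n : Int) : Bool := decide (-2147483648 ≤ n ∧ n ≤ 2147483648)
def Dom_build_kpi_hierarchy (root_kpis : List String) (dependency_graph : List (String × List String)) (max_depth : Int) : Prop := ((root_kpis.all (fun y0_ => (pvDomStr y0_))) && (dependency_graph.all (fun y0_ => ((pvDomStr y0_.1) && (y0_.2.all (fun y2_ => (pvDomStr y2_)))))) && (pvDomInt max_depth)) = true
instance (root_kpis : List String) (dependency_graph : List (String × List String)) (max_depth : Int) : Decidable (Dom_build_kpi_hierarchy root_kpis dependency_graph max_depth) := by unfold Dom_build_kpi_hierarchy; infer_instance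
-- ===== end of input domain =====

-- B replaces A's per-root BFS (visited set + frontier loop running to max_depth even on
-- empty frontiers) by two flat union passes plus the same precedence subtractions (faster).

-- shared lookup helper: dependency_graph.get(k, [])
def pvGetDep (g : List (String × List String)) (k : String) : List String :=
  PySem.Dict.getD (PySem.Dict.mk g) k []

-- ===== PORT A =====
-- inner loop: 'for dep in dependency_graph.get(metric, []): if dep not in visited: …'
def pvInner (g : List (String × List String))
    (vc : PySem.Set String × List String) (metric : String) :
    PySem.Set String × List String :=
  (pvGetDep g metric).foldl
    (fun vc dep =>
      if PySem.Set.contains vc.1 dep then vc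
      else (PySem.Set.add vc.1 dep, vc.2 ++ [dep])) vc

-- one iteration of 'for depth in range(1, max_depth + 1)'; state (visited, current, first, second)
def pvDepthStep (g : List (String × List String))
    (st : PySem.Set String × List String × PySem.Set String × PySem.Set String)
    (depth : Int) :
    PySem.Set String × List String × PySem.Set String × PySem.Set String :=
  let vn := st.2.1.foldl (pvInner g) (st.1, [])
  let first := if depth == (1 : Int) then PySem.Set.update st.2.2.1 vn.2 else st.2.2.1
  let second := if depth == (2 : Int) then PySem.Set.update st.2.2.2 vn.2 else st.2.2.2
  (vn.1, vn.2, first, second)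

-- one iteration of 'for root in root_kpis'; state (main, first_degree, second_degree)
def pvRootStep (g : List (String × List String)) (max_depth : Int)
    (h : PySem.Set String × PySem.Set String × PySem.Set String) (root : String) :
    PySem.Set String × PySem.Set String × PySem.Set String :=
  let main := PySem.Set.add h.1 root
  let st := (PySem.List.pyRange 1 (max_depth + 1) 1).foldl (pvDepthStep g)
      (PySem.Set.add PySem.Set.empty root, [root], h.2.1, h.2.2)
  (main, st.2.2.1, st.2.2.2)

def build_kpi_hierarchy (root_kpis : List String) (dependency_graph : List (String × List String)) (max_depth : Int) : List (String × List String) :=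
  let h := root_kpis.foldl (pvRootStep dependency_graph max_depth)
      (PySem.Set.empty, PySem.Set.empty, PySem.Set.empty)
  let first := PySem.Set.diff h.2.1 h.1
  let second := PySem.Set.diff (PySem.Set.diff h.2.2 h.1) first
  [("main", PySem.List.sorted h.1 (fun x => x) false),
   ("first_degree", PySem.List.sorted first (fun x => x) false),
   ("second_degree", PySem.List.sorted second (fun x => x) false)]

-- ===== PORT B =====
def build_kpi_hierarchy_alt (root_kpis : List String) (dependency_graph : List (String × List String)) (max_depth : Int) : List (String × List String) :=
  let main := PySem.Set.ofList root_kpis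
  let first_raw :=
    if max_depth ≥ 1 then
      root_kpis.foldl (fun s r => PySem.Set.update s (pvGetDep dependency_graph r)) PySem.Set.empty
    else PySem.Set.empty
  let second_raw :=
    if max_depth ≥ 2 then
      first_raw.foldl (fun s m => PySem.Set.update s (pvGetDep dependency_graph m)) PySem.Set.empty
    else PySem.Set.empty
  let first := PySem.Set.diff first_raw main
  let second := PySem.Set.diff (PySem.Set.diff second_raw main) first
  [("main", PySem.List.sorted main (fun x => x) false),
   ("first_degree", PySem.List.sorted first (fun x => x) false),
   ("second_degree", PySem.List.sorted second (fun x => x) false)]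

-- ===== PRECONDITION & SPEC =====
def Spec_build_kpi_hierarchy (root_kpis : List String) (dependency_graph : List (String × List String)) (max_depth : Int) (out : List (String × List String)) : Prop := out = build_kpi_hierarchy_alt root_kpis dependency_graph max_depth
instance (root_kpis : List String) (dependency_graph : List (String × List String)) (max_depth : Int) (out : List (String × List String)) : Decidable (Spec_build_kpi_hierarchy root_kpis dependency_graph max_depth out) := by unfold Spec_build_kpi_hierarchy; infer_instance

-- ===== CLAIM (what is proved, stated in full; the proofs are below) =====
def Claim_equal_build_kpi_hierarchy : Prop := ∀ (root_kpis : List String) (dependency_graph : List (String × List String)) (max_depth : Int), Dom_build_kpi_hierarchy root_kpis dependency_graph max_depth → Spec_build_kpi_hierarchy root_kpis dependency_graph max_depth (build_kpi_hierarchy root_kpis dependency_graph max_depth)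

-- ===== LEMMAS AND PROOFS =====

-- the raw dep-loop over one deps list: the visited component becomes visited.update(ds)
theorem pv_innerFold_fst (ds : List String) : ∀ (v : PySem.Set String) (nl : List String),
    (ds.foldl (fun vc dep => if PySem.Set.contains vc.1 dep then vc
      else (PySem.Set.add vc.1 dep, vc.2 ++ [dep])) (v, nl)).1 = PySem.Set.update v ds := by
  induction ds with
  | nil => intro v nl; simp [PySem.Set.update]
  | cons d ds ih =>
    intro v nl
    simp only [List.foldl_cons, PySem.Set.update_cons]
    by_cases hc : PySem.Set.contains v d
    · rw [if_pos hc, PySem.Set.add_of_mem ((PySem.Set.contains_iff v d).mp hc)]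
      exact ih v nl
    · rw [if_neg hc]
      exact ih (PySem.Set.add v d) (nl ++ [d])

-- the raw dep-loop: membership in next_level
theorem pv_innerFold_snd (ds : List String) : ∀ (v : PySem.Set String) (nl : List String) (x : String),
    x ∈ (ds.foldl (fun vc dep => if PySem.Set.contains vc.1 dep then vc
      else (PySem.Set.add vc.1 dep, vc.2 ++ [dep])) (v, nl)).2 ↔ x ∈ nl ∨ (x ∈ ds ∧ x ∉ v) := by
  induction ds with
  | nil => intro v nl x; simp
  | cons d ds ih =>
    intro v nl x
    simp only [List.foldl_cons]
    by_cases hc : PySem.Set.contains v d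
    · rw [if_pos hc, ih v nl x]
      have hd : d ∈ v := (PySem.Set.contains_iff v d).mp hc
      simp only [List.mem_cons]
      by_cases hxd : x = d
      · subst hxd; simp [hd]
      · simp [hxd]
    · rw [if_neg hc, ih (PySem.Set.add v d) (nl ++ [d]) x]
      have hd : d ∉ v := fun h => hc ((PySem.Set.contains_iff v d).mpr h)
      simp only [List.mem_append, List.mem_cons, PySem.Set.mem_add, List.not_mem_nil]
      by_cases hxd : x = d
      · subst hxd; simp [hd]
      · simp [hxd]

theorem pvInner_fst (g : List (String × List String)) (m : String)
    (v : PySem.Set String) (nl : List String) :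
    (pvInner g (v, nl) m).1 = PySem.Set.update v (pvGetDep g m) :=
  pv_innerFold_fst (pvGetDep g m) v nl

theorem mem_pvInner_snd (g : List (String × List String)) (m : String)
    (v : PySem.Set String) (nl : List String) (x : String) :
    x ∈ (pvInner g (v, nl) m).2 ↔ x ∈ nl ∨ (x ∈ pvGetDep g m ∧ x ∉ v) :=
  pv_innerFold_snd (pvGetDep g m) v nl x

-- the level loop over 'current': membership in the produced next_level
theorem mem_level_snd (g : List (String × List String)) (ms : List String)
    (v : PySem.Set String) (nl : List String) (x : String) :
    x ∈ (ms.foldl (pvInner g) (v, nl)).2 ↔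
      x ∈ nl ∨ ((∃ m ∈ ms, x ∈ pvGetDep g m) ∧ x ∉ v) := by
  induction ms generalizing v nl with
  | nil => simp
  | cons m ms ih =>
    simp only [List.foldl_cons]
    have hfold : ms.foldl (pvInner g) (pvInner g (v, nl) m)
        = ms.foldl (pvInner g) ((pvInner g (v, nl) m).1, (pvInner g (v, nl) m).2) := rfl
    rw [hfold, ih, mem_pvInner_snd, pvInner_fst]
    constructor
    · rintro ((h | ⟨h1, h2⟩) | ⟨⟨m', hm', hx⟩, h2⟩)
      · exact Or.inl h
      · exact Or.inr ⟨⟨m, List.mem_cons_self, h1⟩, h2⟩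
      · rw [PySem.Set.mem_update] at h2; push_neg at h2
        exact Or.inr ⟨⟨m', List.mem_cons_of_mem _ hm', hx⟩, h2.1⟩
    · rintro (h | ⟨⟨m', hm', hx⟩, h2⟩)
      · exact Or.inl (Or.inl h)
      · rcases List.mem_cons.mp hm' with rfl | hm'
        · exact Or.inl (Or.inr ⟨hx, h2⟩)
        · by_cases hdm : x ∈ pvGetDep g m
          · exact Or.inl (Or.inr ⟨hdm, h2⟩)
          · refine Or.inr ⟨⟨m', hm', hx⟩, ?_⟩
            rw [PySem.Set.mem_update]; push_neg; exact ⟨h2, hdm⟩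

-- depth-1 frontier and depth-2 frontier of a single root
def pvN1 (g : List (String × List String)) (r : String) : List String :=
  (pvInner g (PySem.Set.add PySem.Set.empty r, []) r).2

def pvN2 (g : List (String × List String)) (r : String) : List String :=
  ((pvN1 g r).foldl (pvInner g)
    (PySem.Set.update (PySem.Set.add PySem.Set.empty r) (pvGetDep g r), [])).2

theorem mem_pvN1 (g : List (String × List String)) (r x : String) :
    x ∈ pvN1 g r ↔ x ∈ pvGetDep g r ∧ x ≠ r := by
  unfold pvN1
  rw [mem_pvInner_snd]
  simp [PySem.Set.empty]

theorem mem_pvN2 (g : List (String × List String)) (r x : String) :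
    x ∈ pvN2 g r ↔
      (∃ m ∈ pvN1 g r, x ∈ pvGetDep g m) ∧ ¬(x = r ∨ x ∈ pvGetDep g r) := by
  unfold pvN2
  rw [mem_level_snd]
  simp only [List.not_mem_nil, false_or, PySem.Set.mem_update, PySem.Set.mem_add,
    PySem.Set.empty]

-- depth iterations past 2 never touch the (first, second) components
theorem depth_tail_fixed (g : List (String × List String)) (L : List Int)
    (hL : ∀ d ∈ L, d ≠ 1 ∧ d ≠ 2)
    (st : PySem.Set String × List String × PySem.Set String × PySem.Set String) :
    ((L.foldl (pvDepthStep g) st).2.2) = st.2.2 := by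
  induction L generalizing st with
  | nil => rfl
  | cons d L ih =>
    have hd := hL d List.mem_cons_self
    simp only [List.foldl_cons]
    rw [ih (fun e he => hL e (List.mem_cons_of_mem _ he))]
    simp [pvDepthStep, hd.1, hd.2]

-- one root's whole BFS, by the size of max_depth
theorem pvRootStep_le_zero (g : List (String × List String)) (md : Int) (hmd : md ≤ 0)
    (h : PySem.Set String × PySem.Set String × PySem.Set String) (r : String) :
    pvRootStep g md h r = (PySem.Set.add h.1 r, h.2.1, h.2.2) := by
  simp [pvRootStep, PySem.List.pyRange_one_eq_nil (by omega : md + 1 ≤ 1)]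

theorem pvRootStep_eq_one (g : List (String × List String))
    (h : PySem.Set String × PySem.Set String × PySem.Set String) (r : String) :
    pvRootStep g 1 h r =
      (PySem.Set.add h.1 r, PySem.Set.update h.2.1 (pvN1 g r), h.2.2) := by
  have hsplit : PySem.List.pyRange 1 ((1 : Int) + 1) 1 = [1] :=
    PySem.List.pyRange_one_singleton 1
  simp only [pvRootStep]
  rw [hsplit]
  simp only [List.foldl_cons, List.foldl_nil, pvDepthStep]
  simp only [show ((1 : Int) == 1) = true from rfl, show ((1 : Int) == 2) = false from rfl,
    if_true, Bool.false_eq_true, if_false]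
  rfl

theorem depth12 (g : List (String × List String)) (f s : PySem.Set String) (r : String) :
    (pvDepthStep g (pvDepthStep g (PySem.Set.add PySem.Set.empty r, [r], f, s) 1) 2).2.2
      = (PySem.Set.update f (pvN1 g r), PySem.Set.update s (pvN2 g r)) := by
  have h1 : (pvInner g (PySem.Set.add PySem.Set.empty r, ([] : List String)) r).1
      = PySem.Set.update (PySem.Set.add PySem.Set.empty r) (pvGetDep g r) :=
    pvInner_fst g r _ _
  simp only [pvDepthStep, List.foldl_cons, List.foldl_nil]
  simp only [show ((1 : Int) == 1) = true from rfl, show ((1 : Int) == 2) = false from rfl,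
    show ((2 : Int) == 1) = false from rfl, show ((2 : Int) == 2) = true from rfl,
    if_true, Bool.false_eq_true, if_false]
  rw [h1]
  rfl

theorem pvRootStep_ge_two (g : List (String × List String)) (md : Int) (hmd : 2 ≤ md)
    (h : PySem.Set String × PySem.Set String × PySem.Set String) (r : String) :
    pvRootStep g md h r =
      (PySem.Set.add h.1 r, PySem.Set.update h.2.1 (pvN1 g r),
       PySem.Set.update h.2.2 (pvN2 g r)) := by
  have hsplit : PySem.List.pyRange 1 (md + 1) 1
      = 1 :: 2 :: PySem.List.pyRange 3 (md + 1) 1 := by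
    rw [PySem.List.pyRange_one_cons (by omega : (1 : Int) < md + 1)]
    norm_num
    rw [PySem.List.pyRange_one_cons (by omega : (2 : Int) < md + 1)]
    norm_num
  simp only [pvRootStep]
  rw [hsplit]
  simp only [List.foldl_cons]
  rw [depth_tail_fixed g _ (fun d hd => by
    have h3 := (PySem.List.mem_pyRange_one).mp hd
    exact ⟨by omega, by omega⟩), depth12]

-- the outer loop over root_kpis, component by component
theorem rootFold_main (g : List (String × List String)) (md : Int) (roots : List String)
    (h : PySem.Set String × PySem.Set String × PySem.Set String) :
    (roots.foldl (pvRootStep g md) h).1 = roots.foldl PySem.Set.add h.1 := by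
  induction roots generalizing h with
  | nil => rfl
  | cons r roots ih =>
    simp only [List.foldl_cons]
    rw [ih]
    rfl

theorem rootFold_le_zero (g : List (String × List String)) (md : Int) (hmd : md ≤ 0)
    (roots : List String)
    (h : PySem.Set String × PySem.Set String × PySem.Set String) :
    (roots.foldl (pvRootStep g md) h).2 = h.2 := by
  induction roots generalizing h with
  | nil => rfl
  | cons r roots ih =>
    simp only [List.foldl_cons]
    rw [ih, pvRootStep_le_zero g md hmd]

theorem rootFold_snd_eq_one (g : List (String × List String)) (roots : List String)
    (h : PySem.Set String × PySem.Set String × PySem.Set String) :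
    (roots.foldl (pvRootStep g 1) h).2.2 = h.2.2 := by
  induction roots generalizing h with
  | nil => rfl
  | cons r roots ih =>
    simp only [List.foldl_cons]
    rw [ih, pvRootStep_eq_one]

theorem rootFold_first (g : List (String × List String)) (md : Int) (hmd : 1 ≤ md)
    (roots : List String)
    (h : PySem.Set String × PySem.Set String × PySem.Set String) (x : String) :
    x ∈ (roots.foldl (pvRootStep g md) h).2.1 ↔
      x ∈ h.2.1 ∨ ∃ r ∈ roots, x ∈ pvN1 g r := by
  have hstep : ∀ (h : PySem.Set String × PySem.Set String × PySem.Set String) (r : String),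
      (pvRootStep g md h r).2.1 = PySem.Set.update h.2.1 (pvN1 g r) := by
    intro h r
    rcases eq_or_lt_of_le hmd with h1 | h1
    · rw [← h1, pvRootStep_eq_one]
    · rw [pvRootStep_ge_two g md (by omega) h r]
  induction roots generalizing h with
  | nil => simp
  | cons r roots ih =>
    simp only [List.foldl_cons]
    refine (ih (pvRootStep g md h r)).trans ?_
    rw [hstep h r, PySem.Set.mem_update, List.exists_mem_cons_iff]
    tauto

theorem rootFold_second (g : List (String × List String)) (md : Int) (hmd : 2 ≤ md)
    (roots : List String)
    (h : PySem.Set String × PySem.Set String × PySem.Set String) (x : String) :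
    x ∈ (roots.foldl (pvRootStep g md) h).2.2 ↔
      x ∈ h.2.2 ∨ ∃ r ∈ roots, x ∈ pvN2 g r := by
  induction roots generalizing h with
  | nil => simp
  | cons r roots ih =>
    simp only [List.foldl_cons]
    refine (ih (pvRootStep g md h r)).trans ?_
    rw [pvRootStep_ge_two g md hmd, PySem.Set.mem_update, List.exists_mem_cons_iff]
    tauto

theorem rootFold_first_nodup (g : List (String × List String)) (md : Int)
    (roots : List String)
    (h : PySem.Set String × PySem.Set String × PySem.Set String)
    (hn : h.2.1.Nodup) : (roots.foldl (pvRootStep g md) h).2.1.Nodup := by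
  induction roots generalizing h with
  | nil => exact hn
  | cons r roots ih =>
    simp only [List.foldl_cons]
    refine ih _ ?_
    rcases (by omega : md ≤ 0 ∨ 0 < md) with h1 | h1
    · rw [pvRootStep_le_zero g md h1]; exact hn
    rcases eq_or_lt_of_le (by omega : (1 : Int) ≤ md) with h2 | h2
    · rw [← h2, pvRootStep_eq_one]; exact PySem.Set.nodup_update _ _ hn
    · rw [pvRootStep_ge_two g md (by omega)]; exact PySem.Set.nodup_update _ _ hn

theorem rootFold_second_nodup (g : List (String × List String)) (md : Int)
    (roots : List String)
    (h : PySem.Set String × PySem.Set String × PySem.Set String)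
    (hn : h.2.2.Nodup) : (roots.foldl (pvRootStep g md) h).2.2.Nodup := by
  induction roots generalizing h with
  | nil => exact hn
  | cons r roots ih =>
    simp only [List.foldl_cons]
    refine ih _ ?_
    rcases (by omega : md ≤ 0 ∨ 0 < md) with h1 | h1
    · rw [pvRootStep_le_zero g md h1]; exact hn
    rcases eq_or_lt_of_le (by omega : (1 : Int) ≤ md) with h2 | h2
    · rw [← h2, pvRootStep_eq_one]; exact hn
    · rw [pvRootStep_ge_two g md (by omega)]; exact PySem.Set.nodup_update _ _ hn

-- B's union passes: membership and nodup
theorem mem_unionFold (g : List (String × List String)) (ms : List String)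
    (s : PySem.Set String) (x : String) :
    x ∈ ms.foldl (fun s m => PySem.Set.update s (pvGetDep g m)) s ↔
      x ∈ s ∨ ∃ m ∈ ms, x ∈ pvGetDep g m := by
  induction ms generalizing s with
  | nil => simp
  | cons m ms ih =>
    simp only [List.foldl_cons]
    refine (ih (PySem.Set.update s (pvGetDep g m))).trans ?_
    rw [PySem.Set.mem_update, List.exists_mem_cons_iff]
    tauto

theorem unionFold_nodup (g : List (String × List String)) (ms : List String)
    (s : PySem.Set String) (hn : s.Nodup) :
    (ms.foldl (fun s m => PySem.Set.update s (pvGetDep g m)) s).Nodup := by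
  induction ms generalizing s with
  | nil => exact hn
  | cons m ms ih =>
    simp only [List.foldl_cons]
    exact ih _ (PySem.Set.nodup_update _ _ hn)

-- two nodup sets with the same members have the same sorted()
theorem pv_sorted_set_eq (s t : PySem.Set String) (hs : s.Nodup) (ht : t.Nodup)
    (h : ∀ x, x ∈ s ↔ x ∈ t) :
    PySem.List.sorted s (fun x => x) false = PySem.List.sorted t (fun x => x) false :=
  (PySem.List.sorted_id_eq_sorted_id_iff_perm s t).mpr ((List.perm_ext_iff_of_nodup hs ht).mpr h)

-- away from the roots, A's raw first tier is B's raw first tier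
theorem firstset_iff (g : List (String × List String)) (roots : List String) (x : String)
    (hm : x ∉ roots) :
    (∃ r ∈ roots, x ∈ pvN1 g r) ↔ (∃ r ∈ roots, x ∈ pvGetDep g r) := by
  constructor
  · rintro ⟨r, hr, h⟩; exact ⟨r, hr, ((mem_pvN1 g r x).mp h).1⟩
  · rintro ⟨r, hr, h⟩
    exact ⟨r, hr, (mem_pvN1 g r x).mpr ⟨h, fun he => hm (he ▸ hr)⟩⟩

-- away from main and the raw first tier, A's raw second tier is B's raw second tier
theorem secondset_iff (g : List (String × List String)) (roots : List String) (x : String)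
    (hm : x ∉ roots) (hf : ¬ ∃ r ∈ roots, x ∈ pvGetDep g r) :
    (∃ r ∈ roots, x ∈ pvN2 g r) ↔
      (∃ m, (∃ r ∈ roots, m ∈ pvGetDep g r) ∧ x ∈ pvGetDep g m) := by
  constructor
  · rintro ⟨r, hr, h2⟩
    obtain ⟨⟨m, hm1, hxm⟩, -⟩ := (mem_pvN2 g r x).mp h2
    exact ⟨m, ⟨r, hr, ((mem_pvN1 g r m).mp hm1).1⟩, hxm⟩
  · rintro ⟨m, ⟨r, hr, hmr⟩, hxm⟩
    by_cases hmm : m = r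
    · subst hmm; exact absurd ⟨m, hr, hxm⟩ hf
    · refine ⟨r, hr, (mem_pvN2 g r x).mpr
        ⟨⟨m, (mem_pvN1 g r m).mpr ⟨hmr, hmm⟩, hxm⟩, ?_⟩⟩
      rintro (rfl | hxr)
      · exact hm hr
      · exact hf ⟨r, hr, hxr⟩

-- ===== VERDICT (by name: the statement is the Claim_ definition above) =====
theorem build_kpi_hierarchy_spec : Claim_equal_build_kpi_hierarchy := by
  intro roots g md _
  show build_kpi_hierarchy roots g md = build_kpi_hierarchy_alt roots g md
  simp only [build_kpi_hierarchy, build_kpi_hierarchy_alt]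
  set F := roots.foldl (pvRootStep g md) (PySem.Set.empty, PySem.Set.empty, PySem.Set.empty)
    with hF
  have hmain : F.1 = PySem.Set.ofList roots := by rw [hF, rootFold_main]; rfl
  rw [hmain]
  have hM : ∀ x : String, x ∈ PySem.Set.ofList roots ↔ x ∈ roots :=
    fun x => PySem.Set.mem_ofList roots x
  rcases (by omega : md < 1 ∨ 1 ≤ md) with h1 | h1
  · -- max_depth <= 0: both tiers empty on both sides
    rw [if_neg (by omega), if_neg (by omega)]
    have h2 : F.2 = (PySem.Set.empty, PySem.Set.empty) := by
      rw [hF, rootFold_le_zero g md (by omega)]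
    have h21 : F.2.1 = PySem.Set.empty := by rw [h2]
    have h22 : F.2.2 = PySem.Set.empty := by rw [h2]
    rw [h21, h22]
  · set BF := roots.foldl (fun s r => PySem.Set.update s (pvGetDep g r)) PySem.Set.empty
      with hBF
    have hAFn : F.2.1.Nodup := by rw [hF]; exact rootFold_first_nodup g md roots _ List.nodup_nil
    have hBFn : BF.Nodup := by rw [hBF]; exact unionFold_nodup g roots _ List.nodup_nil
    have hAFm : ∀ x, x ∈ F.2.1 ↔ ∃ r ∈ roots, x ∈ pvN1 g r := by
      intro x; rw [hF, rootFold_first g md h1]; simp [PySem.Set.empty]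
    have hBFm : ∀ x, x ∈ BF ↔ ∃ r ∈ roots, x ∈ pvGetDep g r := by
      intro x; rw [hBF, mem_unionFold]; simp [PySem.Set.empty]
    have e1 : PySem.List.sorted (PySem.Set.diff F.2.1 (PySem.Set.ofList roots)) (fun x => x) false
        = PySem.List.sorted (PySem.Set.diff BF (PySem.Set.ofList roots)) (fun x => x) false := by
      refine pv_sorted_set_eq _ _ (PySem.Set.nodup_diff _ _ hAFn) (PySem.Set.nodup_diff _ _ hBFn) ?_
      intro x
      rw [PySem.Set.mem_diff, PySem.Set.mem_diff, hAFm x, hBFm x]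
      constructor
      · rintro ⟨ha, hb⟩
        exact ⟨(firstset_iff g roots x (fun hc => hb ((hM x).mpr hc))).mp ha, hb⟩
      · rintro ⟨ha, hb⟩
        exact ⟨(firstset_iff g roots x (fun hc => hb ((hM x).mpr hc))).mpr ha, hb⟩
    rcases eq_or_lt_of_le h1 with h2 | h2
    · -- max_depth == 1: second tier empty on both sides
      rw [if_pos (by omega), if_neg (by omega)]
      have hAS : F.2.2 = PySem.Set.empty := by rw [hF, ← h2, rootFold_snd_eq_one]
      rw [hAS, e1]
      rfl
    · -- max_depth >= 2
      rw [if_pos (by omega), if_pos (by omega)]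
      set BS := BF.foldl (fun s m => PySem.Set.update s (pvGetDep g m)) PySem.Set.empty
        with hBS
      have hASn : F.2.2.Nodup := by
        rw [hF]; exact rootFold_second_nodup g md roots _ List.nodup_nil
      have hBSn : BS.Nodup := by rw [hBS]; exact unionFold_nodup g BF _ List.nodup_nil
      have hASm : ∀ x, x ∈ F.2.2 ↔ ∃ r ∈ roots, x ∈ pvN2 g r := by
        intro x; rw [hF, rootFold_second g md (by omega)]; simp [PySem.Set.empty]
      have hBSm : ∀ x, x ∈ BS ↔ ∃ m, (∃ r ∈ roots, m ∈ pvGetDep g r) ∧ x ∈ pvGetDep g m := by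
        intro x
        rw [hBS, mem_unionFold]
        simp only [PySem.Set.empty, List.not_mem_nil, false_or]
        exact exists_congr fun m => and_congr_left fun _ => hBFm m
      have e2 : PySem.List.sorted
            (PySem.Set.diff (PySem.Set.diff F.2.2 (PySem.Set.ofList roots))
              (PySem.Set.diff F.2.1 (PySem.Set.ofList roots))) (fun x => x) false
          = PySem.List.sorted
            (PySem.Set.diff (PySem.Set.diff BS (PySem.Set.ofList roots))
              (PySem.Set.diff BF (PySem.Set.ofList roots))) (fun x => x) false := by
        refine pv_sorted_set_eq _ _ (PySem.Set.nodup_diff _ _ (PySem.Set.nodup_diff _ _ hASn))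
          (PySem.Set.nodup_diff _ _ (PySem.Set.nodup_diff _ _ hBSn)) ?_
        intro x
        rw [PySem.Set.mem_diff, PySem.Set.mem_diff, PySem.Set.mem_diff, PySem.Set.mem_diff,
          PySem.Set.mem_diff, PySem.Set.mem_diff, hASm x, hBSm x, hAFm x, hBFm x, hM x]
        constructor
        · rintro ⟨⟨h2s, hmm⟩, hn⟩
          have hf : ¬ ∃ r ∈ roots, x ∈ pvGetDep g r := fun hc =>
            hn ⟨(firstset_iff g roots x hmm).mpr hc, hmm⟩
          exact ⟨⟨(secondset_iff g roots x hmm hf).mp h2s, hmm⟩, fun hc => hf hc.1⟩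
        · rintro ⟨⟨h2s, hmm⟩, hn⟩
          have hf : ¬ ∃ r ∈ roots, x ∈ pvGetDep g r := fun hc => hn ⟨hc, hmm⟩
          exact ⟨⟨(secondset_iff g roots x hmm hf).mpr h2s, hmm⟩,
            fun hc => hf ((firstset_iff g roots x hmm).mp hc.1)⟩
      rw [e1, e2]
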